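-- pv_equiv track=rewrite | github.com/sanghyukmoon/fiso | fiso/fiso_tree.py | calc_leaf
-- ===== SOURCE A (Python) =====
-- def calc_leaf(iso_dict, iso_list, eic_list):
--     """Calculate leaf HBPs
--
--     Parameters
--     ----------
--     iso_dict : dict
--         iso_dict returned by construct_tree
--     iso_list : list
--         iso_list returned by construct_tree
--     eic_list : list
--         eic_list returned by construct_tree
--
--     Returns
--     -------
--     leaf_dict : dict
--         Dictionary containing all leaf HBPs.
--     """
--     leaf_dict = {}
--     eic_dict = dict(zip(iso_list, eic_list))
--
--     # fsd = find-split-dict, for each split list isos that it owns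
--     fsd = {}
--     for iso in iso_list:
--         if iso not in iso_dict:
--             continue
--         split = _find_split(iso, eic_dict)
--         if split in fsd:
--             fsd[split].append(iso)
--         else:
--             fsd[split] = [split]
--
--     for split in fsd:
--         if len(eic_dict[split]) == 0:
--             leaf_dict[split] = []
--             # but split also owns nodes above with only 1 child
--             for subiso in fsd[split]:
--                 if subiso in iso_dict:
--                     leaf_dict[split] += iso_dict[subiso]
--     return leaf_dict
--
-- def _find_split(iso, eic_dict):
--     # For a given iso and child data eic_dict, find the point where iso splits
--     # eic_dict = dict(zip(iso_list,eic_list))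
--     eics = eic_dict[iso]
--     le = len(eics)
--
--     # If only 1 child, recurse
--     if le == 1:
--         return _find_split(eics[0], eic_dict)
--     # 0 child leaf node, or multiple children, return self
--     else:
--         return iso
-- ===== SOURCE B (Python) =====
-- def calc_leaf(iso_dict, iso_list, eic_list):
--     """Calculate leaf HBPs (reverse-edge label propagation instead of
--     per-iso recursive chain walks)."""
--     eic_dict = dict(zip(iso_list, eic_list))
--
--     # Reverse the single-child edges; chain terminals label themselves.
--     rev = {}
--     split = {}
--     stack = []
--     for node, eics in eic_dict.items():
--         if len(eics) == 1:
--             rev.setdefault(eics[0], []).append(node)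
--         else:
--             split[node] = node
--             stack.append(node)
--
--     # Propagate each terminal's label up the reversed single-child edges.
--     while stack:
--         node = stack.pop()
--         s = split[node]
--         for parent in rev.get(node, []):
--             split[parent] = s
--             stack.append(parent)
--
--     # Group isos by their (precomputed) split.
--     fsd = {}
--     for iso in iso_list:
--         if iso in iso_dict:
--             s = split[iso]
--             if s in fsd:
--                 fsd[s].append(iso)
--             else:
--                 fsd[s] = [s]
--
--     return {s: [x for sub in owners for x in iso_dict.get(sub, [])]
--             for s, owners in fsd.items() if len(eic_dict[s]) == 0}
-- ===== Notes on version B (the rewrite author's own statement) =====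
-- stated objective: alternative
-- what changed: Replaces A's per-iso recursive _find_split chain walk by a single reverse-edge label propagation: B reverses the single-child edges once, pushes the chain terminals on a worklist and propagates each terminal's label up its chains, so every node is resolved once; the final dict is built by a comprehension instead of in-place +=.
import Mathlib
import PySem

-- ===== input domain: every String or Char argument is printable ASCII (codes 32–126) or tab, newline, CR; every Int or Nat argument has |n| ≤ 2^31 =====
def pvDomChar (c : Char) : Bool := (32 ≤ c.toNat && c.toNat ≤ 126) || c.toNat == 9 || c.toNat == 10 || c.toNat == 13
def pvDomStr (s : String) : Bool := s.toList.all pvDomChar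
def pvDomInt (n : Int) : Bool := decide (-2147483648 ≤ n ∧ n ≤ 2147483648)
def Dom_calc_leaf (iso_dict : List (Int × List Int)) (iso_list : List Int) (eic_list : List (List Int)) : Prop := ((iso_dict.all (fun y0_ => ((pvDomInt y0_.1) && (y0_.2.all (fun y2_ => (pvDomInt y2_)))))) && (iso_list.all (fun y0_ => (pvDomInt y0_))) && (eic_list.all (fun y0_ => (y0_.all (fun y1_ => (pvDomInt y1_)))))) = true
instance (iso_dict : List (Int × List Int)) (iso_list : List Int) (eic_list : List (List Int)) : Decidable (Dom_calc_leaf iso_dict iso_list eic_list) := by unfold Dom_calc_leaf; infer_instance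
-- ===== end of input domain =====

-- B replaces A's per-iso recursive single-child chain walk (_find_split) by one
-- reverse-edge label propagation from the chain terminals (a worklist), so every
-- node is resolved once; objective: alternative algorithm (same result, different traversal).
-- Return-value equivalence only; neither version observably mutates its arguments.

-- shared primitive: lookup in the iso_dict association list (Python dict membership/[]):
def pvLookup (d : List (Int × List Int)) (k : Int) : Option (List Int) :=
  (d.find? (fun p => p.1 == k)).map (fun p => p.2)

-- ===== PORT A =====
-- _find_split: recursion on the single-child chain; fuel-bounded (none = the chain
-- leaves the dict (Python KeyError) or does not end within the fuel (unbounded recursion)).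
def findSplitA (eic : PySem.Dict Int (List Int)) : Nat → Int → Option Int
  | 0, _ => none
  | fuel+1, iso =>
    match eic.get? iso with
    | none => none                        -- KeyError in Python
    | some [c] => findSplitA eic fuel c   -- le == 1: recurse on eics[0]
    | some _ => some iso                  -- 0 or ≥2 children: return self

-- body of A's first loop ('for iso in iso_list: …')
def fsdStepA (iso_dict : List (Int × List Int)) (eic : PySem.Dict Int (List Int)) (fuel : Nat)
    (fsd : PySem.Dict Int (List Int)) (iso : Int) : PySem.Dict Int (List Int) :=
  if (pvLookup iso_dict iso).isSome then
    match findSplitA eic fuel iso with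
    | some split =>
      match fsd.get? split with
      | some l => fsd.insert split (l ++ [iso])   -- fsd[split].append(iso)
      | none => fsd.insert split [split]          -- fsd[split] = [split]
    | none => fsd                                 -- unreachable under Pre_ (Python raises/diverges)
  else fsd

-- body of A's second loop: leaf_dict[split] = [] then 'leaf_dict[split] += iso_dict[subiso]'
def leafStepA (iso_dict : List (Int × List Int)) (eic : PySem.Dict Int (List Int))
    (leaf : PySem.Dict Int (List Int)) (p : Int × List Int) : PySem.Dict Int (List Int) :=
  match eic.get? p.1 with
  | some [] =>
    leaf.insert p.1 (p.2.foldl (fun acc sub =>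
      match pvLookup iso_dict sub with
      | some l => acc ++ l
      | none => acc) [])
  | _ => leaf

-- eic_dict = dict(zip(iso_list, eic_list)); then the two loops
def calc_leaf (iso_dict : List (Int × List Int)) (iso_list : List Int) (eic_list : List (List Int)) : List (Int × List Int) :=
  ((iso_list.foldl
      (fsdStepA iso_dict (PySem.Dict.ofList (iso_list.zip eic_list)) (iso_list.length + 1))
      PySem.Dict.empty).items.foldl
    (leafStepA iso_dict (PySem.Dict.ofList (iso_list.zip eic_list))) PySem.Dict.empty).items

-- ===== PORT B =====
-- B's first loop over eic_dict.items(): reverse the single-child edges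
-- (rev.setdefault(eics[0], []).append(node)) and push the chain terminals,
-- labelled with themselves, onto the worklist. State = (rev, split, stack);
-- the stack keeps its top at the HEAD (Python appends and pops at the right end).
def initStepB (st : PySem.Dict Int (List Int) × PySem.Dict Int Int × List Int)
    (p : Int × List Int) : PySem.Dict Int (List Int) × PySem.Dict Int Int × List Int :=
  match p.2 with
  | [c] => (st.1.insert c (st.1.getD c [] ++ [p.1]), st.2.1, st.2.2)
  | _ => (st.1, st.2.1.insert p.1 p.1, p.1 :: st.2.2)

-- B's while loop: pop a node, copy its label to every reverse-edge parent and
-- push them (fuel-bounded port; the fuel is a totality device, 3·|items|+1 is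
-- enough because every push is of a not-yet-labelled node).
def propagateB (rev : PySem.Dict Int (List Int)) : Nat → List Int → PySem.Dict Int Int → PySem.Dict Int Int
  | 0, _, split => split
  | _+1, [], split => split
  | fuel+1, n :: rest, split =>
    match split.get? n with
    | some s =>
      let step := (rev.getD n []).foldl (fun acc p => (acc.1.insert p s, p :: acc.2)) (split, rest)
      propagateB rev fuel step.2 step.1
    | none => propagateB rev fuel rest split   -- unreachable: every stacked node is labelled (Python: split[node])

-- B's grouping loop: one dictionary lookup instead of a chain walk
def groupStepB (iso_dict : List (Int × List Int)) (split : PySem.Dict Int Int)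
    (fsd : PySem.Dict Int (List Int)) (iso : Int) : PySem.Dict Int (List Int) :=
  if (pvLookup iso_dict iso).isSome then
    match split.get? iso with
    | some s => fsd.insert s ((fsd.get? s).elim [s] (· ++ [iso]))
    | none => fsd                 -- unreachable under Pre_ (Python raises KeyError)
  else fsd

-- the final dict comprehension over fsd.items() (distinct keys ⇒ a filterMap)
def calc_leaf_alt (iso_dict : List (Int × List Int)) (iso_list : List Int) (eic_list : List (List Int)) : List (Int × List Int) :=
  let eic := PySem.Dict.ofList (iso_list.zip eic_list)
  let ini := eic.items.foldl initStepB (PySem.Dict.empty, PySem.Dict.empty, [])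
  let split := propagateB ini.1 (3 * eic.items.length + 1) ini.2.2 ini.2.1
  let fsd := iso_list.foldl (groupStepB iso_dict split) PySem.Dict.empty
  fsd.items.filterMap (fun p =>
    match eic.get? p.1 with
    | some [] => some (p.1, p.2.flatMap (fun sub => (pvLookup iso_dict sub).getD []))
    | _ => none)                  -- none = nonempty child list (or, unreachable under Pre_, a missing key)

-- ===== PRECONDITION & SPEC =====
-- closed-form shape condition on the input: every single-child chain starting from an
-- iso that A processes stays inside the child dict and reaches a node with ≠ 1 children
-- within |iso_list|+1 steps (more steps would revisit a key, i.e. a cycle). These are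
-- exactly the inputs on which Python A returns: otherwise A raises KeyError or recurses
-- without bound (RecursionError).
def chainOk (eic : PySem.Dict Int (List Int)) : Nat → Int → Bool
  | 0, _ => false
  | fuel+1, iso =>
    match eic.get? iso with
    | none => false
    | some [c] => chainOk eic fuel c
    | some _ => true

def Pre_calc_leaf (iso_dict : List (Int × List Int)) (iso_list : List Int) (eic_list : List (List Int)) : Prop :=
  ∀ iso ∈ iso_list, (pvLookup iso_dict iso).isSome = true →
    chainOk (PySem.Dict.ofList (iso_list.zip eic_list)) (iso_list.length + 1) iso = true
instance (iso_dict : List (Int × List Int)) (iso_list : List Int) (eic_list : List (List Int)) : Decidable (Pre_calc_leaf iso_dict iso_list eic_list) := by unfold Pre_calc_leaf; infer_instance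

def pvWitness_calc_leaf : (List (Int × List Int)) × List Int × List (List Int) :=
  ([(1, [10]), (2, [20]), (3, [30])], [1, 2, 3], [[2], [3], []])

def Spec_calc_leaf (iso_dict : List (Int × List Int)) (iso_list : List Int) (eic_list : List (List Int)) (out : List (Int × List Int)) : Prop := out = calc_leaf_alt iso_dict iso_list eic_list
instance (iso_dict : List (Int × List Int)) (iso_list : List Int) (eic_list : List (List Int)) (out : List (Int × List Int)) : Decidable (Spec_calc_leaf iso_dict iso_list eic_list out) := by unfold Spec_calc_leaf; infer_instance

-- ===== CLAIM (what is proved, stated in full; the proofs are below) =====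
def Claim_equal_calc_leaf : Prop := ∀ (iso_dict : List (Int × List Int)) (iso_list : List Int) (eic_list : List (List Int)), Dom_calc_leaf iso_dict iso_list eic_list → Pre_calc_leaf iso_dict iso_list eic_list → Spec_calc_leaf iso_dict iso_list eic_list (calc_leaf iso_dict iso_list eic_list)

-- ===== LEMMAS AND PROOFS =====

-- chainOk is exactly "findSplitA succeeds"
theorem chainOk_iff_isSome (eic : PySem.Dict Int (List Int)) :
    ∀ (fuel : Nat) (iso : Int), chainOk eic fuel iso = true ↔ (findSplitA eic fuel iso).isSome = true := by
  intro fuel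
  induction fuel with
  | zero => intro iso; simp [chainOk, findSplitA]
  | succ f ih =>
    intro iso
    simp only [chainOk, findSplitA]
    cases h : eic.get? iso with
    | none => simp
    | some l =>
      match l with
      | [] => simp
      | [c] => exact ih c
      | a :: b :: t => simp

-- findSplitA's value does not depend on the fuel (whenever it succeeds)
theorem findSplitA_det (eic : PySem.Dict Int (List Int)) :
    ∀ (f : Nat) (g : Nat) (x s v : Int),
      findSplitA eic f x = some s → findSplitA eic g x = some v → s = v := by
  intro f
  induction f with
  | zero => intro g x s v hf; simp [findSplitA] at hf
  | succ f ih =>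
    intro g x s v hf hg
    cases g with
    | zero => simp [findSplitA] at hg
    | succ g =>
      simp only [findSplitA] at hf hg
      cases h : eic.get? x with
      | none => rw [h] at hf; simp at hf
      | some l =>
        rw [h] at hf hg
        match l with
        | [] => simp at hf hg; omega
        | [c] => exact ih g c s v hf hg
        | a :: b :: t => simp at hf hg; omega

-- invariant of B's init fold (P = the already-processed keys)
def InvI (eic : PySem.Dict Int (List Int)) (P : List Int) (rev : PySem.Dict Int (List Int))
    (split : PySem.Dict Int Int) (stack : List Int) : Prop :=
  (∀ c q, q ∈ rev.getD c [] → q ∈ P ∧ eic.get? q = some [c]) ∧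
  (∀ c, (rev.getD c []).Nodup) ∧
  (∀ x s, split.get? x = some s → s = x ∧ ∃ le, eic.get? x = some le ∧ le.length ≠ 1) ∧
  (∀ x, (split.get? x).isSome = true ↔ x ∈ stack) ∧
  stack.Nodup ∧
  (∀ q c, q ∈ P → eic.get? q = some [c] → q ∈ rev.getD c []) ∧
  (∀ x ∈ stack, x ∈ P) ∧
  (∀ q le, q ∈ P → eic.get? q = some le → le.length ≠ 1 → (split.get? q).isSome = true)

theorem init_fold (eic : PySem.Dict Int (List Int)) :
    ∀ (l : List (Int × List Int)) (P : List Int) (rev : PySem.Dict Int (List Int))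
      (split : PySem.Dict Int Int) (stack : List Int),
      (∀ p ∈ l, eic.get? p.1 = some p.2) →
      (l.map Prod.fst).Nodup →
      (∀ p ∈ l, p.1 ∉ P) →
      InvI eic P rev split stack →
      InvI eic (P ++ l.map Prod.fst)
        (l.foldl initStepB (rev, split, stack)).1
        (l.foldl initStepB (rev, split, stack)).2.1
        (l.foldl initStepB (rev, split, stack)).2.2 := by
  intro l
  induction l with
  | nil => intro P rev split stack _ _ _ hInv; simpa using hInv
  | cons p l ih =>
    intro P rev split stack hl hnd hfresh hInv
    obtain ⟨I1, I2, I3, I4, I5, I6, I7, I8⟩ := hInv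
    have hp : eic.get? p.1 = some p.2 := hl p (by simp)
    have hp1P : p.1 ∉ P := hfresh p (by simp)
    have hstep : InvI eic (P ++ [p.1]) (initStepB (rev, split, stack) p).1
        (initStepB (rev, split, stack) p).2.1 (initStepB (rev, split, stack) p).2.2 := by
      have hcase : (∃ c, p.2 = [c]) ∨ p.2.length ≠ 1 := by
        match h : p.2 with
        | [c] => exact Or.inl ⟨c, rfl⟩
        | [] => right; simp
        | a :: b :: t => right; simp
      rcases hcase with ⟨c, hc⟩ | hlen
      · -- single child: only rev changes
        have hred : initStepB (rev, split, stack) p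
            = (rev.insert c (rev.getD c [] ++ [p.1]), split, stack) := by
          simp [initStepB, hc]
        rw [hred]
        refine ⟨?_, ?_, I3, I4, I5, ?_, fun x hx => by simp [I7 x hx], ?_⟩
        · intro c' q hq
          rw [PySem.Dict.getD_insert] at hq
          by_cases hcc : c' = c
          · rw [if_pos hcc] at hq
            rcases List.mem_append.mp hq with h | h
            · obtain ⟨h1, h2⟩ := I1 c q h
              exact ⟨by simp [h1], by rw [hcc]; exact h2⟩
            · simp at h
              subst h
              exact ⟨by simp, by rw [hcc, ← hc]; exact hp⟩
          · rw [if_neg hcc] at hq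
            obtain ⟨h1, h2⟩ := I1 c' q hq
            exact ⟨by simp [h1], h2⟩
        · intro c'
          rw [PySem.Dict.getD_insert]
          by_cases hcc : c' = c
          · rw [if_pos hcc]
            refine List.Nodup.append (I2 c) (by simp) ?_
            intro q hq hq'
            simp at hq'
            exact hp1P (hq' ▸ (I1 c q hq).1)
          · rw [if_neg hcc]; exact I2 c'
        · intro q c' hqP hq
          rw [PySem.Dict.getD_insert]
          rcases List.mem_append.mp hqP with h | h
          · have := I6 q c' h hq
            by_cases hcc : c' = c
            · rw [if_pos hcc]; exact List.mem_append.mpr (Or.inl (hcc ▸ this))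
            · rw [if_neg hcc]; exact this
          · simp at h
            subst h
            rw [hp] at hq
            have hcc : c' = c := by rw [hc] at hq; simpa using hq.symm
            rw [if_pos hcc]
            simp
        · intro q le hqP hle hlen
          rcases List.mem_append.mp hqP with h | h
          · exact I8 q le h hle hlen
          · simp at h
            subst h
            rw [hp] at hle
            injection hle with h2
            rw [← h2, hc] at hlen
            simp at hlen
      · -- terminal: label itself and push it
        have hred : initStepB (rev, split, stack) p
            = (rev, split.insert p.1 p.1, p.1 :: stack) := by
          match h : p.2 with
          | [c] => rw [h] at hlen; simp at hlen
          | [] => simp [initStepB, h]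
          | a :: b :: t => simp [initStepB, h]
        rw [hred]
        have hp1stack : p.1 ∉ stack := fun h => hp1P (I7 p.1 h)
        refine ⟨fun c q hq => ⟨by simp [(I1 c q hq).1], (I1 c q hq).2⟩, I2, ?_, ?_, ?_, ?_, ?_, ?_⟩
        · intro x s hx
          rw [PySem.Dict.get?_insert] at hx
          by_cases hxp : x = p.1
          · subst hxp
            rw [if_pos rfl] at hx
            refine ⟨by simpa using hx.symm, p.2, hp, hlen⟩
          · rw [if_neg hxp] at hx
            exact I3 x s hx
        · intro x
          rw [PySem.Dict.get?_insert]
          by_cases hxp : x = p.1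
          · simp [hxp]
          · rw [if_neg hxp]
            simp only [List.mem_cons]
            rw [I4 x]
            exact ⟨Or.inr, fun h => h.elim (fun h => absurd h hxp) id⟩
        · exact List.Nodup.cons hp1stack I5
        · intro q c hqP hq
          rcases List.mem_append.mp hqP with h | h
          · exact I6 q c h hq
          · simp at h
            subst h
            rw [hp] at hq
            injection hq with h2
            rw [h2] at hlen
            simp at hlen
        · intro x hx
          rcases List.mem_cons.mp hx with h | h
          · simp [h]
          · simp [I7 x h]
        · intro q le hqP hle hlen
          rw [PySem.Dict.get?_insert]
          by_cases hqp : q = p.1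
          · simp [hqp]
          · rw [if_neg hqp]
            rcases List.mem_append.mp hqP with h | h
            · exact I8 q le h hle hlen
            · simp at h
              exact absurd h hqp
    have hl' : ∀ q ∈ l, eic.get? q.1 = some q.2 := fun q hq => hl q (by simp [hq])
    have hnd' : (l.map Prod.fst).Nodup := by simp at hnd; exact hnd.2
    have hfresh' : ∀ q ∈ l, q.1 ∉ P ++ [p.1] := by
      intro q hq
      simp only [List.mem_append, List.mem_singleton]
      rintro (h | h)
      · exact hfresh q (by simp [hq]) h
      · have hnd2 : p.1 ∉ l.map Prod.fst := (List.nodup_cons.mp (by simpa using hnd)).1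
        exact hnd2 (h ▸ List.mem_map_of_mem (f := Prod.fst) hq)
    have := ih (P ++ [p.1]) (initStepB (rev, split, stack) p).1
      (initStepB (rev, split, stack) p).2.1 (initStepB (rev, split, stack) p).2.2
      hl' hnd' hfresh' hstep
    simpa [List.append_assoc] using this

-- invariant of B's worklist loop
def InvP (eic rev : PySem.Dict Int (List Int)) (st : List Int) (split : PySem.Dict Int Int) : Prop :=
  st.Nodup ∧
  (∀ n ∈ st, (split.get? n).isSome = true) ∧
  (∀ x s, split.get? x = some s → ∃ g, findSplitA eic g x = some s) ∧
  (∀ x s, split.get? x = some s →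
    (∃ le, eic.get? x = some le ∧ le.length ≠ 1) ∨
    (∃ c, eic.get? x = some [c] ∧ (split.get? c).isSome = true ∧ c ∉ st)) ∧
  (∀ c ∈ st, ∀ q ∈ rev.getD c [], (split.get? q).isSome = false) ∧
  (∀ n, (split.get? n).isSome = true → n ∈ st ∨ ∀ q ∈ rev.getD n [], (split.get? q).isSome = true)

-- the pair fold in propagateB, split into its two components
theorem pair_fold_eq (s : Int) :
    ∀ (ps : List Int) (m : PySem.Dict Int Int) (st : List Int),
      ps.foldl (fun acc p => (acc.1.insert p s, p :: acc.2)) (m, st)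
        = (ps.foldl (fun m p => m.insert p s) m, ps.reverse ++ st) := by
  intro ps
  induction ps with
  | nil => intro m st; simp
  | cons a ps ih => intro m st; simp [ih]

theorem get?_foldl_insert_const (s : Int) :
    ∀ (ps : List Int) (m : PySem.Dict Int Int) (x : Int),
      (ps.foldl (fun m p => m.insert p s) m).get? x = if x ∈ ps then some s else m.get? x := by
  intro ps
  induction ps with
  | nil => intro m x; simp
  | cons a ps ih =>
    intro m x
    simp only [List.foldl_cons, ih, PySem.Dict.get?_insert]
    by_cases hx : x ∈ ps <;> by_cases hxa : x = a <;> simp [hx, hxa]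

-- counting: labelling a batch of fresh keys shrinks the unlabelled-key count by the batch size
theorem count_sub (p : Int → Bool) :
    ∀ (ps keys : List Int), keys.Nodup → ps.Nodup →
      (∀ q ∈ ps, q ∈ keys ∧ p q = true) →
      (keys.filter (fun k => p k && !(decide (k ∈ ps)))).length + ps.length
        ≤ (keys.filter p).length := by
  intro ps
  induction ps with
  | nil =>
    intro keys hk _ _
    have h : keys.filter (fun k => p k && !(decide (k ∈ ([] : List Int)))) = keys.filter p := by
      apply List.filter_congr; intro x hx; simp
    rw [h]; simp
  | cons a ps ih =>
    intro keys hk hnd hsub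
    obtain ⟨ha, hpa⟩ := hsub a (by simp)
    have hperm : keys.Perm (a :: keys.erase a) := List.perm_cons_erase ha
    have hk' : (keys.erase a).Nodup := hk.erase a
    have hna : a ∉ ps := by simp at hnd; exact hnd.1
    have e0 : List.countP (fun k => p k && !decide (k ∈ a :: ps)) (keys.erase a)
        = List.countP (fun k => p k && !decide (k ∈ ps)) (keys.erase a) := by
      apply List.countP_congr
      intro x hx
      have hxa : x ≠ a := ((List.Nodup.mem_erase_iff hk).mp hx).1
      simp [hxa]
    have e1 : List.countP (fun k => p k && !decide (k ∈ a :: ps)) keys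
        = List.countP (fun k => p k && !decide (k ∈ ps)) (keys.erase a) := by
      rw [List.Perm.countP_eq _ hperm, List.countP_cons, e0]
      simp
    have e2 : List.countP p keys = List.countP p (keys.erase a) + 1 := by
      rw [List.Perm.countP_eq _ hperm, List.countP_cons, hpa]
      simp
    have hih := ih (keys.erase a) hk' (by simp at hnd; exact hnd.2) ?_
    · rw [← List.countP_eq_length_filter, ← List.countP_eq_length_filter] at hih ⊢
      rw [e1, e2]
      simp only [List.length_cons]
      omega
    · intro q hq
      obtain ⟨h1, h2⟩ := hsub q (by simp [hq])
      exact ⟨(List.Nodup.mem_erase_iff hk).mpr ⟨fun h => hna (h ▸ hq), h1⟩, h2⟩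

-- the worklist loop: labels persist, stay sound, and the final labelling is
-- closed under reverse edges (given enough fuel)
theorem prop_main (eic rev : PySem.Dict Int (List Int))
    (hkeys : eic.keys.Nodup)
    (hrevmem : ∀ c q, q ∈ rev.getD c [] → eic.get? q = some [c])
    (hrevnd : ∀ c, (rev.getD c []).Nodup) :
    ∀ (fuel : Nat) (st : List Int) (split : PySem.Dict Int Int),
      InvP eic rev st split →
      st.length + 2 * (eic.keys.filter (fun k => (split.get? k).isNone)).length ≤ fuel →
      (∀ x s, split.get? x = some s → (propagateB rev fuel st split).get? x = some s) ∧
      (∀ x s, (propagateB rev fuel st split).get? x = some s → ∃ g, findSplitA eic g x = some s) ∧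
      (∀ n, ((propagateB rev fuel st split).get? n).isSome = true →
        ∀ q ∈ rev.getD n [], ((propagateB rev fuel st split).get? q).isSome = true) := by
  intro fuel
  induction fuel with
  | zero =>
    intro st split hInv hM
    obtain ⟨I1, I2, I3, I4, I5, I6⟩ := hInv
    have hst : st = [] := by
      cases st with
      | nil => rfl
      | cons a t => simp at hM
    subst hst
    refine ⟨fun x s h => h, I3, ?_⟩
    intro n hn q hq
    rcases I6 n hn with h | h
    · simp at h
    · exact h q hq
  | succ f ih =>
    intro st split hInv hM
    obtain ⟨I1, I2, I3, I4, I5, I6⟩ := hInv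
    cases st with
    | nil =>
      refine ⟨fun x s h => h, I3, ?_⟩
      intro n hn q hq
      rcases I6 n hn with h | h
      · simp at h
      · exact h q hq
    | cons n rest =>
      obtain ⟨s, hs⟩ := Option.isSome_iff_exists.mp (I2 n (by simp))
      have hred : propagateB rev (f + 1) (n :: rest) split
          = propagateB rev f ((rev.getD n []).reverse ++ rest)
              ((rev.getD n []).foldl (fun m p => m.insert p s) split) := by
        simp only [propagateB, hs, pair_fold_eq]
      set ps := rev.getD n [] with hps
      have F1 : ∀ q ∈ ps, (split.get? q).isSome = false := I5 n (by simp)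
      have F2 : ∀ q ∈ ps, eic.get? q = some [n] := fun q hq => hrevmem n q hq
      have F3 : ps.Nodup := hrevnd n
      have F4 : n ∉ ps := by
        intro h
        have := F1 n h
        rw [hs] at this
        simp at this
      have F6 : n ∉ rest := (List.nodup_cons.mp I1).1
      have F7 : rest.Nodup := (List.nodup_cons.mp I1).2
      set split' := ps.foldl (fun m p => m.insert p s) split with hsplit'
      have F5 : ∀ x, split'.get? x = if x ∈ ps then some s else split.get? x :=
        fun x => get?_foldl_insert_const s ps split x
      have hmono : ∀ x v, split.get? x = some v → split'.get? x = some v := by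
        intro x v hx
        rw [F5]
        by_cases h : x ∈ ps
        · have := F1 x h
          rw [hx] at this
          simp at this
        · rw [if_neg h]; exact hx
      have hmonoS : ∀ x, (split.get? x).isSome = true → (split'.get? x).isSome = true := by
        intro x hx
        obtain ⟨v, hv⟩ := Option.isSome_iff_exists.mp hx
        rw [hmono x v hv]; rfl
      have hpsl : ∀ q ∈ ps, split'.get? q = some s := by
        intro q hq; rw [F5, if_pos hq]
      have hgs : ∃ g, findSplitA eic g n = some s := I3 n s hs
      -- the new invariant
      have hInv' : InvP eic rev (ps.reverse ++ rest) split' := by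
        refine ⟨?_, ?_, ?_, ?_, ?_, ?_⟩
        · refine List.Nodup.append (by simpa using F3) F7 ?_
          intro q hq hq'
          have h1 := F1 q (List.mem_reverse.mp hq)
          have h2 := I2 q (by simp [hq'])
          rw [h1] at h2; exact absurd h2 (by simp)
        · intro x hx
          rcases List.mem_append.mp hx with h | h
          · rw [hpsl x (List.mem_reverse.mp h)]; rfl
          · exact hmonoS x (I2 x (by simp [h]))
        · intro x v hx
          rw [F5] at hx
          by_cases h : x ∈ ps
          · rw [if_pos h] at hx
            obtain ⟨g, hg⟩ := hgs
            injection hx with hx'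
            refine ⟨g + 1, ?_⟩
            rw [← hx']
            simp only [findSplitA, F2 x h]
            exact hg
          · rw [if_neg h] at hx
            exact I3 x v hx
        · intro x v hx
          rw [F5] at hx
          by_cases h : x ∈ ps
          · refine Or.inr ⟨n, F2 x h, ?_, ?_⟩
            · apply hmonoS
              rw [hs]; rfl
            · intro hn'
              rcases List.mem_append.mp hn' with h' | h'
              · exact F4 (List.mem_reverse.mp h')
              · exact F6 h'
          · rw [if_neg h] at hx
            rcases I4 x v hx with hL | ⟨c, hc1, hc2, hc3⟩
            · exact Or.inl hL
            · refine Or.inr ⟨c, hc1, hmonoS c hc2, ?_⟩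
              intro hc'
              rcases List.mem_append.mp hc' with h' | h'
              · rw [F1 c (List.mem_reverse.mp h')] at hc2; exact absurd hc2 (by simp)
              · exact hc3 (by simp [h'])
        · intro c hc q hq
          have hqc : eic.get? q = some [c] := hrevmem c q hq
          rcases List.mem_append.mp hc with h | h
          · have hcps := List.mem_reverse.mp h
            have hqps : q ∉ ps := by
              intro hqn
              have := F2 q hqn
              rw [hqc] at this
              injection this with h2
              simp at h2
              exact F4 (h2 ▸ hcps)
            rw [F5, if_neg hqps]
            by_cases hlab : (split.get? q).isSome = true
            · obtain ⟨v, hv⟩ := Option.isSome_iff_exists.mp hlab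
              rcases I4 q v hv with ⟨le, he1, he2⟩ | ⟨c'', hc1, hc2, _⟩
              · rw [hqc] at he1; injection he1 with h2; rw [← h2] at he2; simp at he2
              · rw [hqc] at hc1
                injection hc1 with h2
                have h3 : c'' = c := by simpa using h2.symm
                subst h3
                rw [F1 c'' hcps] at hc2
                simp at hc2
            · simpa using hlab
          · have hnl := I5 c (by simp [h]) q hq
            have hqps : q ∉ ps := by
              intro hqn
              have := F2 q hqn
              rw [hqc] at this
              injection this with h2
              simp at h2
              exact F6 (h2 ▸ h)
            rw [F5, if_neg hqps]
            exact hnl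
        · intro x hx
          rw [F5] at hx
          by_cases h : x ∈ ps
          · exact Or.inl (List.mem_append.mpr (Or.inl (List.mem_reverse.mpr h)))
          · rw [if_neg h] at hx
            obtain ⟨v, hv⟩ := Option.isSome_iff_exists.mp hx
            rcases I6 x (by rw [hv]; rfl) with hm | hall
            · rcases List.mem_cons.mp hm with h' | h'
              · subst h'
                right
                intro q hq
                rw [hpsl q hq]; rfl
              · exact Or.inl (List.mem_append.mpr (Or.inr h'))
            · right
              intro q hq
              exact hmonoS q (hall q hq)
      -- the measure
      have hcount := count_sub (fun k => (split.get? k).isNone) ps eic.keys hkeys F3 ?_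
      · have hcount2 : (eic.keys.filter (fun k => (split.get? k).isNone && !(decide (k ∈ ps)))).length + ps.length
            ≤ (eic.keys.filter (fun k => (split.get? k).isNone)).length := hcount
        have hfilt : eic.keys.filter (fun k => (split'.get? k).isNone)
            = eic.keys.filter (fun k => (split.get? k).isNone && !(decide (k ∈ ps))) := by
          apply List.filter_congr
          intro x _
          rw [F5]
          by_cases h : x ∈ ps <;> simp [h]
        have hM' : ((ps.reverse ++ rest).length)
            + 2 * (eic.keys.filter (fun k => (split'.get? k).isNone)).length ≤ f := by
          rw [hfilt]
          simp only [List.length_append, List.length_reverse]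
          simp only [List.length_cons] at hM
          omega
        have hIH := ih (ps.reverse ++ rest) split' hInv' hM'
        rw [hred]
        exact ⟨fun x v hv => hIH.1 x v (hmono x v hv), hIH.2.1, hIH.2.2⟩
      · intro q hq
        constructor
        · by_contra hqk
          have := (PySem.Dict.get?_eq_none_iff_not_mem_keys eic q).mpr hqk
          rw [F2 q hq] at this
          exact absurd this (by simp)
        · rw [Option.isNone_iff_eq_none]
          have := F1 q hq
          simpa using this

-- a node with ≠ 1 children is its own split
theorem findSplitA_terminal (eic : PySem.Dict Int (List Int)) (x : Int) (le : List Int)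
    (h : eic.get? x = some le) (hlen : le.length ≠ 1) : findSplitA eic 1 x = some x := by
  simp only [findSplitA, h]
  match le, hlen with
  | [], _ => rfl
  | a :: b :: t, _ => rfl
  | [c], h => simp at h

-- all facts about B's final split map, assembled
theorem splitF_props (eic : PySem.Dict Int (List Int)) (hkeys : eic.keys.Nodup) :
    (∀ x s, (propagateB (eic.items.foldl initStepB (PySem.Dict.empty, PySem.Dict.empty, [])).1
        (3 * eic.items.length + 1)
        (eic.items.foldl initStepB (PySem.Dict.empty, PySem.Dict.empty, [])).2.2
        (eic.items.foldl initStepB (PySem.Dict.empty, PySem.Dict.empty, [])).2.1).get? x = some s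
      → ∃ g, findSplitA eic g x = some s) ∧
    (∀ g x s, findSplitA eic g x = some s →
      (propagateB (eic.items.foldl initStepB (PySem.Dict.empty, PySem.Dict.empty, [])).1
        (3 * eic.items.length + 1)
        (eic.items.foldl initStepB (PySem.Dict.empty, PySem.Dict.empty, [])).2.2
        (eic.items.foldl initStepB (PySem.Dict.empty, PySem.Dict.empty, [])).2.1).get? x = some s) := by
  have hPkeys : eic.items.map Prod.fst = eic.keys := rfl
  have hitems : ∀ p ∈ eic.items, eic.get? p.1 = some p.2 := by
    intro p hp
    cases p with
    | mk k v => exact PySem.Dict.get?_of_mem_items eic hp hkeys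
  have hInv0 : InvI eic [] PySem.Dict.empty PySem.Dict.empty [] := by
    refine ⟨?_, ?_, ?_, ?_, ?_, ?_, ?_, ?_⟩ <;>
      simp [PySem.Dict.getD_empty, PySem.Dict.get?_empty]
  have hinit := init_fold eic eic.items [] PySem.Dict.empty PySem.Dict.empty []
    hitems (by rw [hPkeys]; exact hkeys) (by simp) hInv0
  simp only [List.nil_append] at hinit
  rw [hPkeys] at hinit
  obtain ⟨I1, I2, I3, I4, I5, I6, I7, I8⟩ := hinit
  set ini := eic.items.foldl initStepB (PySem.Dict.empty, PySem.Dict.empty, ([] : List Int)) with hini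
  have hxkeys : ∀ x le, eic.get? x = some le → x ∈ eic.keys := by
    intro x le hx
    by_contra h
    rw [(PySem.Dict.get?_eq_none_iff_not_mem_keys eic x).mpr h] at hx
    exact absurd hx (by simp)
  have hrevmem : ∀ c q, q ∈ ini.1.getD c [] → eic.get? q = some [c] := fun c q h => (I1 c q h).2
  have hrevnd : ∀ c, (ini.1.getD c []).Nodup := I2
  have hInvP : InvP eic ini.1 ini.2.2 ini.2.1 := by
    refine ⟨I5, fun n hn => (I4 n).mpr hn, ?_, ?_, ?_, ?_⟩
    · intro x s hx
      obtain ⟨hsx, le, hle, hlen⟩ := I3 x s hx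
      exact ⟨1, by rw [hsx]; exact findSplitA_terminal eic x le hle hlen⟩
    · intro x s hx
      obtain ⟨hsx, le, hle, hlen⟩ := I3 x s hx
      exact Or.inl ⟨le, hle, hlen⟩
    · intro c hc q hq
      rw [Bool.eq_false_iff]
      intro hq1
      obtain ⟨v, hv⟩ := Option.isSome_iff_exists.mp hq1
      obtain ⟨hsx, le, hle, hlen⟩ := I3 q v hv
      rw [(I1 c q hq).2] at hle
      injection hle with h2
      rw [← h2] at hlen
      simp at hlen
    · intro n hn
      exact Or.inl ((I4 n).mp hn)
  have hM : ini.2.2.length + 2 * (eic.keys.filter (fun k => (ini.2.1.get? k).isNone)).length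
      ≤ 3 * eic.items.length + 1 := by
    have h1 : ini.2.2.length ≤ eic.keys.length :=
      List.Subperm.length_le (List.Nodup.subperm I5 I7)
    have h2 : (eic.keys.filter (fun k => (ini.2.1.get? k).isNone)).length ≤ eic.keys.length :=
      List.length_filter_le _ _
    have h3 : eic.keys.length = eic.items.length := by rw [← hPkeys]; simp
    omega
  have hmain := prop_main eic ini.1 hkeys hrevmem hrevnd
    (3 * eic.items.length + 1) ini.2.2 ini.2.1 hInvP hM
  refine ⟨hmain.2.1, ?_⟩
  intro g
  induction g with
  | zero => intro x s hx; simp [findSplitA] at hx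
  | succ g ihg =>
    intro x s hx
    have hx' := hx
    simp only [findSplitA] at hx'
    cases hgx : eic.get? x with
    | none => rw [hgx] at hx'; simp at hx'
    | some le =>
      rw [hgx] at hx'
      have hxmem : x ∈ eic.keys := hxkeys x le hgx
      match le, hgx, hx' with
      | [c], hgx, hx' =>
        have hc := ihg c s hx'
        have hxrev : x ∈ ini.1.getD c [] := I6 x c hxmem hgx
        have hlab := hmain.2.2 c (by rw [hc]; rfl) x hxrev
        obtain ⟨v, hv⟩ := Option.isSome_iff_exists.mp hlab
        obtain ⟨g', hg'⟩ := hmain.2.1 x v hv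
        have hvs := findSplitA_det eic g' (g + 1) x v s hg' hx
        rw [← hvs]
        exact hv
      | [], hgx, hx' =>
        have hsx : s = x := by simpa using hx'.symm
        have hl0 := I8 x [] hxmem hgx (by simp)
        obtain ⟨v, hv⟩ := Option.isSome_iff_exists.mp hl0
        obtain ⟨hvx, _⟩ := I3 x v hv
        have hpers := hmain.1 x v hv
        rw [hvx] at hpers
        rw [hsx]
        exact hpers
      | a :: b :: t, hgx, hx' =>
        have hsx : s = x := by simpa using hx'.symm
        have hl0 := I8 x (a :: b :: t) hxmem hgx (by simp)
        obtain ⟨v, hv⟩ := Option.isSome_iff_exists.mp hl0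
        obtain ⟨hvx, _⟩ := I3 x v hv
        have hpers := hmain.1 x v hv
        rw [hvx] at hpers
        rw [hsx]
        exact hpers

-- A's fsd loop and B's grouping loop build the same dictionary
theorem fsd_eq (iso_dict : List (Int × List Int)) (iso_list : List Int) (eic_list : List (List Int))
    (hpre : Pre_calc_leaf iso_dict iso_list eic_list) :
    iso_list.foldl
      (fsdStepA iso_dict (PySem.Dict.ofList (iso_list.zip eic_list)) (iso_list.length + 1))
      PySem.Dict.empty
    = iso_list.foldl
        (groupStepB iso_dict
          (propagateB ((PySem.Dict.ofList (iso_list.zip eic_list)).items.foldl initStepB (PySem.Dict.empty, PySem.Dict.empty, [])).1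
            (3 * (PySem.Dict.ofList (iso_list.zip eic_list)).items.length + 1)
            ((PySem.Dict.ofList (iso_list.zip eic_list)).items.foldl initStepB (PySem.Dict.empty, PySem.Dict.empty, [])).2.2
            ((PySem.Dict.ofList (iso_list.zip eic_list)).items.foldl initStepB (PySem.Dict.empty, PySem.Dict.empty, [])).2.1))
        PySem.Dict.empty := by
  have hprops := splitF_props (PySem.Dict.ofList (iso_list.zip eic_list))
    (PySem.Dict.nodup_keys_ofList _)
  apply PySem.List.foldl_congr_mem
  intro acc iso hiso
  by_cases hmem : (pvLookup iso_dict iso).isSome = true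
  · have hok := (chainOk_iff_isSome _ _ _).mp (hpre iso hiso hmem)
    obtain ⟨s, hA⟩ := Option.isSome_iff_exists.mp hok
    have hB := hprops.2 (iso_list.length + 1) iso s hA
    simp only [fsdStepA, groupStepB, hmem, if_true, hA, hB]
    cases acc.get? s <;> simp [Option.elim]
  · simp only [fsdStepA, groupStepB, hmem]
    simp

-- A's emit loop over a fresh-keyed items list is B's filterMap
theorem leaf_filterMap (iso_dict : List (Int × List Int)) (eic : PySem.Dict Int (List Int)) :
    ∀ (l : List (Int × List Int)) (leaf : PySem.Dict Int (List Int)),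
      leaf.keys.Nodup → (∀ p ∈ l, leaf.contains p.1 = false) → (l.map Prod.fst).Nodup →
      (l.foldl (leafStepA iso_dict eic) leaf).items
        = leaf.items ++ l.filterMap (fun p =>
            match eic.get? p.1 with
            | some [] => some (p.1, p.2.flatMap (fun sub => (pvLookup iso_dict sub).getD []))
            | _ => none) := by
  intro l
  induction l with
  | nil => intro leaf _ _ _; simp
  | cons p l ih =>
    intro leaf hknd hfresh hlnd
    have hfresh' : ∀ q ∈ l, q.1 ≠ p.1 := by
      intro q hq
      have h1 : p.1 ∉ l.map Prod.fst := (List.nodup_cons.mp (by simpa using hlnd)).1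
      intro h
      exact h1 (h ▸ List.mem_map_of_mem (f := Prod.fst) hq)
    have hlnd' : (l.map Prod.fst).Nodup := (List.nodup_cons.mp (by simpa using hlnd)).2
    cases hep : eic.get? p.1 with
    | none =>
      have hstep : leafStepA iso_dict eic leaf p = leaf := by
        simp [leafStepA, hep]
      simp only [List.foldl_cons, hstep, List.filterMap_cons, hep]
      exact ih leaf hknd (fun q hq => hfresh q (by simp [hq])) hlnd'
    | some le =>
      match le, hep with
      | [], hep =>
        have hcont : leaf.contains p.1 = false := hfresh p (by simp)
        have hv : p.2.foldl (fun acc sub =>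
            match pvLookup iso_dict sub with
            | some l => acc ++ l
            | none => acc) []
            = p.2.flatMap (fun sub => (pvLookup iso_dict sub).getD []) := by
          have hfun : (fun (acc : List Int) (sub : Int) =>
              match pvLookup iso_dict sub with
              | some l => acc ++ l
              | none => acc)
              = fun acc sub => acc ++ (pvLookup iso_dict sub).getD [] := by
            funext acc sub
            cases pvLookup iso_dict sub <;> simp
          rw [hfun, PySem.List.foldl_append_eq_flatMap]
          rfl
        have hstep : leafStepA iso_dict eic leaf p
            = leaf.insert p.1 (p.2.flatMap (fun sub => (pvLookup iso_dict sub).getD [])) := by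
          simp only [leafStepA, hep, hv]
        have hihargs1 : (leaf.insert p.1 (p.2.flatMap (fun sub => (pvLookup iso_dict sub).getD []))).keys.Nodup :=
          PySem.Dict.nodup_keys_insert _ _ _ hknd
        have hihargs2 : ∀ q ∈ l, (leaf.insert p.1 (p.2.flatMap (fun sub => (pvLookup iso_dict sub).getD []))).contains q.1 = false := by
          intro q hq
          rw [PySem.Dict.contains_insert]
          have h1 : (q.1 == p.1) = false := by
            simp only [beq_eq_false_iff_ne, ne_eq]
            exact hfresh' q hq
          rw [h1, hfresh q (by simp [hq])]
          rfl
        simp only [List.foldl_cons, hstep, List.filterMap_cons, hep]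
        rw [ih _ hihargs1 hihargs2 hlnd',
          PySem.Dict.items_insert_of_not_contains leaf _ hcont]
        simp
      | a :: t, hep =>
        have hstep : leafStepA iso_dict eic leaf p = leaf := by
          simp [leafStepA, hep]
        simp only [List.foldl_cons, hstep, List.filterMap_cons, hep]
        exact ih leaf hknd (fun q hq => hfresh q (by simp [hq])) hlnd'

-- keys of the grouped dictionary stay distinct
theorem nodup_keys_fsdA (iso_dict : List (Int × List Int)) (eic : PySem.Dict Int (List Int)) (fuel : Nat) :
    ∀ (l : List Int) (d : PySem.Dict Int (List Int)), d.keys.Nodup →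
      (l.foldl (fsdStepA iso_dict eic fuel) d).keys.Nodup := by
  intro l
  induction l with
  | nil => intro d h; simpa using h
  | cons iso l ih =>
    intro d h
    simp only [List.foldl_cons]
    apply ih
    unfold fsdStepA
    split
    · split
      · split
        · exact PySem.Dict.nodup_keys_insert _ _ _ h
        · exact PySem.Dict.nodup_keys_insert _ _ _ h
      · exact h
    · exact h

-- ===== VERDICT (by name: the statement is the Claim_ definition above) =====
theorem calc_leaf_spec : Claim_equal_calc_leaf := by
  intro iso_dict iso_list eic_list _ hpre
  unfold Spec_calc_leaf calc_leaf calc_leaf_alt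
  have hfsd := fsd_eq iso_dict iso_list eic_list hpre
  have hnd : ((iso_list.foldl
      (fsdStepA iso_dict (PySem.Dict.ofList (iso_list.zip eic_list)) (iso_list.length + 1))
      PySem.Dict.empty).items.map Prod.fst).Nodup :=
    nodup_keys_fsdA iso_dict (PySem.Dict.ofList (iso_list.zip eic_list)) (iso_list.length + 1)
      iso_list PySem.Dict.empty (PySem.Dict.nodup_keys_empty)
  rw [leaf_filterMap iso_dict (PySem.Dict.ofList (iso_list.zip eic_list)) _ PySem.Dict.empty
    PySem.Dict.nodup_keys_empty (fun q _ => PySem.Dict.contains_empty q.1) hnd]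
  rw [hfsd]
  simp [PySem.Dict.empty]
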